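-- pv_equiv track=rewrite | github.com/Gauss-p/leetcode | leetcode2025/2025_02/leetcode2025-02-19.py | maxDistance
-- ===== SOURCE A (Python) =====
-- from typing import List
--
-- def maxDistance(arrays: List[List[int]]) -> int:
--     n = len(arrays)
--     mx, mn = [], []
--     for i in range(n):
--         mx.append((arrays[i][-1], i))
--         mn.append((arrays[i][0], i))
--     mx.sort(reverse = True)
--     mn.sort()
--     i, j = 0, 0
--     while i<n and mx[i][1] == mn[j][1]:
--         i += 1
--     res = abs(mx[i][0]-mn[j][0])
--     i = 0
--     while j<n and mx[i][1] == mn[j][1]: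
--         j += 1
--     res = max(res, abs(mx[i][0]-mn[j][0]))
--     return res
-- ===== SOURCE B (Python) =====
-- def maxDistance(arrays):
--     lasts = [(arr[-1], i) for i, arr in enumerate(arrays)]
--     firsts = [(arr[0], i) for i, arr in enumerate(arrays)]
--     vM, p = max(lasts)
--     vm, q = min(firsts)
--     if p != q:
--         return abs(vM - vm)
--     vM2, _ = max(t for t in lasts if t[1] != p)
--     vm2, _ = min(t for t in firsts if t[1] != q)
--     return max(abs(vM2 - vm), abs(vM - vm2))
-- ===== Notes on version B (the rewrite author's own statement) =====
-- stated objective: alternative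
-- what changed: Replaces A's two full sorts of the (value,index) tuple lists and index-collision scans by direct selection of the lexicographic max/min pair (and, on an index collision, the runner-up via a filtered second pass) - no sorting at all; O(n) selection instead of O(n log n) sorting, though CPython's C-level sort makes the measured times comparable.
-- outside the precondition, e.g. on maxDistance([[1, 2]]): A raises IndexError, B raises ValueError; on maxDistance([[], [1]]): A raises IndexError, B raises IndexError
import Mathlib
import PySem

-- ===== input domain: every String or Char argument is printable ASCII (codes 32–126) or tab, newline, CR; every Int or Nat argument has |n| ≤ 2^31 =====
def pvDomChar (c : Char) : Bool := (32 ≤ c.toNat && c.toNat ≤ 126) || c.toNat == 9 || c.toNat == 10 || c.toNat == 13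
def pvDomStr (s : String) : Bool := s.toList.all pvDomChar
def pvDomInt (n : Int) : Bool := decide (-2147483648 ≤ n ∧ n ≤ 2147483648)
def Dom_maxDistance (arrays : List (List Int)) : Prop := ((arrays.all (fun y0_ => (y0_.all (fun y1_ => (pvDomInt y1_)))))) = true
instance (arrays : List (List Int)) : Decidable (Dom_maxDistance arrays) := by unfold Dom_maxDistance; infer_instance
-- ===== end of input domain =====

-- ===== PORT A =====
-- B replaces A's two sorts + index-scans by direct top-2 extrema selection (single passes, no sorting); return-value equivalence only.
-- pvWhile: the bounded 'while cond(i): i += 1' loop of A (fuel bounds the iterations; A's loop runs at most n steps).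
def pvWhile (p : Nat → Bool) : Nat → Nat → Nat
  | 0, i => i
  | fuel+1, i => if p i then pvWhile p fuel (i+1) else i

def maxDistance (arrays : List (List Int)) : Int :=
  let n := arrays.length
  let mx0 := (PySem.List.pyRange 0 (n : Int) 1).map
    (fun i => (PySem.List.pyGetD (PySem.List.pyGetD arrays i []) (-1) 0, i))
  let mn0 := (PySem.List.pyRange 0 (n : Int) 1).map
    (fun i => (PySem.List.pyGetD (PySem.List.pyGetD arrays i []) 0 0, i))
  let mx := PySem.List.sorted2 mx0 Prod.fst Prod.snd true
  let mn := PySem.List.sorted2 mn0 Prod.fst Prod.snd false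
  let i1 := pvWhile (fun i => decide (i < n) &&
      ((PySem.List.pyGetD mx (i : Int) (0, 0)).2 == (PySem.List.pyGetD mn 0 (0, 0)).2)) (n+1) 0
  let res := |(PySem.List.pyGetD mx (i1 : Int) (0, 0)).1 - (PySem.List.pyGetD mn 0 (0, 0)).1|
  let j1 := pvWhile (fun j => decide (j < n) &&
      ((PySem.List.pyGetD mx 0 (0, 0)).2 == (PySem.List.pyGetD mn (j : Int) (0, 0)).2)) (n+1) 0
  max res |(PySem.List.pyGetD mx 0 (0, 0)).1 - (PySem.List.pyGetD mn (j1 : Int) (0, 0)).1|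

-- ===== PORT B =====
def maxDistance_alt (arrays : List (List Int)) : Int :=
  let lasts := (PySem.List.enumerate arrays 0).map (fun pa => (PySem.List.pyGetD pa.2 (-1) 0, pa.1))
  let firsts := (PySem.List.enumerate arrays 0).map (fun pa => (PySem.List.pyGetD pa.2 0 0, pa.1))
  let M := (PySem.List.max2? lasts Prod.fst Prod.snd).getD (0, 0)
  let m := (PySem.List.min2? firsts Prod.fst Prod.snd).getD (0, 0)
  if M.2 != m.2 then |M.1 - m.1|
  else
    let M2 := (PySem.List.max2? (lasts.filter (fun t => t.2 != M.2)) Prod.fst Prod.snd).getD (0, 0)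
    let m2 := (PySem.List.min2? (firsts.filter (fun t => t.2 != m.2)) Prod.fst Prod.snd).getD (0, 0)
    max |M2.1 - m.1| |M.1 - m2.1|

-- ===== PRECONDITION & SPEC =====
-- Pre_ excludes exactly the inputs where A raises IndexError: fewer than two arrays, or an empty inner array.
def Pre_maxDistance (arrays : List (List Int)) : Prop :=
  2 ≤ arrays.length ∧ ∀ a ∈ arrays, a ≠ []
instance (arrays : List (List Int)) : Decidable (Pre_maxDistance arrays) := by
  unfold Pre_maxDistance; infer_instance
def pvWitness_maxDistance : List (List Int) := [[1, 2], [3]]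
def Spec_maxDistance (arrays : List (List Int)) (out : Int) : Prop := out = maxDistance_alt arrays
instance (arrays : List (List Int)) (out : Int) : Decidable (Spec_maxDistance arrays out) := by unfold Spec_maxDistance; infer_instance

-- ===== CLAIM (what is proved, stated in full; the proofs are below) =====
def Claim_equal_maxDistance : Prop := ∀ (arrays : List (List Int)), Dom_maxDistance arrays → Pre_maxDistance arrays → Spec_maxDistance arrays (maxDistance arrays)

-- ===== LEMMAS AND PROOFS =====

-- the lexicographic key under which Python compares the (value, index) tuples
def pvKey (p : Int × Int) : Lex (Int × Int) := toLex p

theorem pvLt_eq (a b : Int × Int) :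
    (decide (a.1 < b.1) || !decide (b.1 < a.1) && decide (a.2 < b.2)) = decide (pvKey a < pvKey b) := by
  rcases a with ⟨a1, a2⟩; rcases b with ⟨b1, b2⟩
  by_cases h1 : a1 < b1 <;> by_cases h2 : a2 < b2 <;> by_cases h3 : b1 < a1 <;>
    by_cases h4 : a1 = b1 <;>
    (simp [pvKey, Prod.Lex.toLex_lt_toLex, h1, h2, h3, h4]; try omega)

theorem sorted2_eq_sorted_lex (xs : List (Int × Int)) (rev : Bool) :
    PySem.List.sorted2 xs Prod.fst Prod.snd rev = PySem.List.sorted xs pvKey rev := by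
  unfold PySem.List.sorted2 PySem.List.sorted
  cases rev <;> simp [pvLt_eq]

theorem max2?_eq_max?_lex (xs : List (Int × Int)) :
    PySem.List.max2? xs Prod.fst Prod.snd = PySem.List.max? xs pvKey := by
  unfold PySem.List.max2? PySem.List.max?
  congr 1; funext acc x
  cases acc with
  | none => rfl
  | some m => simp only [pvLt_eq]; simp

theorem min2?_eq_min?_lex (xs : List (Int × Int)) :
    PySem.List.min2? xs Prod.fst Prod.snd = PySem.List.min? xs pvKey := by
  unfold PySem.List.min2? PySem.List.min?
  congr 1; funext acc x
  cases acc with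
  | none => rfl
  | some m => simp only [pvLt_eq]; simp

theorem max?_of_sorted_rev (xs : List (Int × Int)) (a : Int × Int) (r : List (Int × Int))
    (hs : PySem.List.sorted xs pvKey true = a :: r) :
    PySem.List.max? xs pvKey = some a := by
  have hne : xs ≠ [] := by
    intro h; rw [h] at hs; simp [PySem.List.sorted] at hs
  obtain ⟨m, hm⟩ : ∃ m, PySem.List.max? xs pvKey = some m := by
    cases h : PySem.List.max? xs pvKey with
    | none => exact absurd ((PySem.List.max?_eq_none_iff xs pvKey).mp h) hne
    | some m => exact ⟨m, rfl⟩
  have hmem : m ∈ xs := PySem.List.max?_mem hm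
  have hmax : ∀ y ∈ xs, pvKey y ≤ pvKey m := PySem.List.max?_isMax hm
  have hamem : a ∈ xs := by
    have : a ∈ PySem.List.sorted xs pvKey true := by rw [hs]; exact List.mem_cons_self
    exact ((PySem.List.mem_sorted _ _ _ _).mp this)
  have hge : ∀ y ∈ xs, pvKey y ≤ pvKey a := PySem.List.key_head_sorted_rev_ge xs pvKey hs
  have : pvKey m = pvKey a := le_antisymm (hge m hmem) (hmax a hamem)
  rw [hm, toLex.injective this]

theorem min?_of_sorted (xs : List (Int × Int)) (a : Int × Int) (r : List (Int × Int))
    (hs : PySem.List.sorted xs pvKey false = a :: r) :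
    PySem.List.min? xs pvKey = some a := by
  have hne : xs ≠ [] := by
    intro h; rw [h] at hs; simp [PySem.List.sorted] at hs
  obtain ⟨m, hm⟩ : ∃ m, PySem.List.min? xs pvKey = some m := by
    cases h : PySem.List.min? xs pvKey with
    | none => exact absurd ((PySem.List.min?_eq_none_iff xs pvKey).mp h) hne
    | some m => exact ⟨m, rfl⟩
  have hmem : m ∈ xs := PySem.List.min?_mem hm
  have hmin : ∀ y ∈ xs, pvKey m ≤ pvKey y := PySem.List.min?_isMin hm
  have hamem : a ∈ xs := by
    have : a ∈ PySem.List.sorted xs pvKey false := by rw [hs]; exact List.mem_cons_self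
    exact ((PySem.List.mem_sorted _ _ _ _).mp this)
  have hge : ∀ y ∈ xs, pvKey a ≤ pvKey y := PySem.List.key_head_sorted_le xs pvKey hs
  have : pvKey m = pvKey a := le_antisymm (hmin a hamem) (hge m hmem)
  rw [hm, toLex.injective this]

theorem max?_filter_of_sorted_rev (xs : List (Int × Int)) (a b : Int × Int) (r : List (Int × Int))
    (hnd : (xs.map Prod.snd).Nodup)
    (hs : PySem.List.sorted xs pvKey true = a :: b :: r) :
    PySem.List.max? (xs.filter (fun t => t.2 != a.2)) pvKey = some b := by
  have hperm : (a :: b :: r).Perm xs := hs ▸ PySem.List.sorted_perm xs pvKey true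
  have hinj : ∀ y ∈ xs, y.2 = a.2 → y = a := by
    intro y hy h
    exact List.inj_on_of_nodup_map hnd hy (hperm.subset List.mem_cons_self) h
  have hbx : b ∈ xs := hperm.subset (by simp)
  have hnds : (a :: b :: r).Nodup := (hperm.nodup_iff).mpr (List.Nodup.of_map _ hnd)
  have hba : b ≠ a := by
    intro h; rw [h] at hnds; simp at hnds
  have hb2 : b.2 ≠ a.2 := fun h => hba (hinj b hbx h)
  have hbmem : b ∈ xs.filter (fun t => t.2 != a.2) := List.mem_filter.mpr ⟨hbx, by simp [hb2]⟩
  have hne : xs.filter (fun t => t.2 != a.2) ≠ [] := fun h => by rw [h] at hbmem; simp at hbmem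
  have hpw : (a :: b :: r).Pairwise (fun p q => pvKey q ≤ pvKey p) :=
    hs ▸ PySem.List.sorted_pairwise_rev xs pvKey
  have hub : ∀ y ∈ xs.filter (fun t => t.2 != a.2), pvKey y ≤ pvKey b := by
    intro y hy
    obtain ⟨hyx, hyf⟩ := List.mem_filter.mp hy
    have hya : y ≠ a := by
      intro h; rw [h] at hyf; simp at hyf
    have : y ∈ b :: r := by
      have := hperm.mem_iff.mpr hyx
      rcases List.mem_cons.mp this with h | h
      · exact absurd h hya
      · exact h
    rcases List.mem_cons.mp this with h | h
    · exact le_of_eq (by rw [h])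
    · exact (List.pairwise_cons.mp (List.pairwise_cons.mp hpw).2).1 y h
  obtain ⟨m, hm⟩ : ∃ m, PySem.List.max? (xs.filter (fun t => t.2 != a.2)) pvKey = some m := by
    cases h : PySem.List.max? (xs.filter (fun t => t.2 != a.2)) pvKey with
    | none => exact absurd ((PySem.List.max?_eq_none_iff _ pvKey).mp h) hne
    | some m => exact ⟨m, rfl⟩
  have hmmem := PySem.List.max?_mem hm
  have : pvKey m = pvKey b := le_antisymm (hub m hmmem) (PySem.List.max?_isMax hm b hbmem)
  rw [hm, toLex.injective this]

theorem min?_filter_of_sorted (xs : List (Int × Int)) (a b : Int × Int) (r : List (Int × Int))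
    (hnd : (xs.map Prod.snd).Nodup)
    (hs : PySem.List.sorted xs pvKey false = a :: b :: r) :
    PySem.List.min? (xs.filter (fun t => t.2 != a.2)) pvKey = some b := by
  have hperm : (a :: b :: r).Perm xs := hs ▸ PySem.List.sorted_perm xs pvKey false
  have hinj : ∀ y ∈ xs, y.2 = a.2 → y = a := by
    intro y hy h
    exact List.inj_on_of_nodup_map hnd hy (hperm.subset List.mem_cons_self) h
  have hbx : b ∈ xs := hperm.subset (by simp)
  have hnds : (a :: b :: r).Nodup := (hperm.nodup_iff).mpr (List.Nodup.of_map _ hnd)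
  have hba : b ≠ a := by
    intro h; rw [h] at hnds; simp at hnds
  have hb2 : b.2 ≠ a.2 := fun h => hba (hinj b hbx h)
  have hbmem : b ∈ xs.filter (fun t => t.2 != a.2) := List.mem_filter.mpr ⟨hbx, by simp [hb2]⟩
  have hne : xs.filter (fun t => t.2 != a.2) ≠ [] := fun h => by rw [h] at hbmem; simp at hbmem
  have hpw : (a :: b :: r).Pairwise (fun p q => pvKey p ≤ pvKey q) :=
    hs ▸ PySem.List.sorted_pairwise xs pvKey
  have hub : ∀ y ∈ xs.filter (fun t => t.2 != a.2), pvKey b ≤ pvKey y := by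
    intro y hy
    obtain ⟨hyx, hyf⟩ := List.mem_filter.mp hy
    have hya : y ≠ a := by
      intro h; rw [h] at hyf; simp at hyf
    have : y ∈ b :: r := by
      have := hperm.mem_iff.mpr hyx
      rcases List.mem_cons.mp this with h | h
      · exact absurd h hya
      · exact h
    rcases List.mem_cons.mp this with h | h
    · exact le_of_eq (by rw [h])
    · exact (List.pairwise_cons.mp (List.pairwise_cons.mp hpw).2).1 y h
  obtain ⟨m, hm⟩ : ∃ m, PySem.List.min? (xs.filter (fun t => t.2 != a.2)) pvKey = some m := by
    cases h : PySem.List.min? (xs.filter (fun t => t.2 != a.2)) pvKey with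
    | none => exact absurd ((PySem.List.min?_eq_none_iff _ pvKey).mp h) hne
    | some m => exact ⟨m, rfl⟩
  have hmmem := PySem.List.min?_mem hm
  have : pvKey m = pvKey b := le_antisymm (PySem.List.min?_isMin hm b hbmem) (hub m hmmem)
  rw [hm, toLex.injective this]



theorem pvWhile_zero (p : Nat → Bool) (fuel : Nat) (h : p 0 = false) :
    pvWhile p fuel 0 = 0 := by
  cases fuel with
  | zero => rfl
  | succ f => simp [pvWhile, h]

theorem pvWhile_one (p : Nat → Bool) (fuel : Nat) (h0 : p 0 = true) (h1 : p 1 = false) :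
    pvWhile p (fuel+1) 0 = 1 := by
  cases fuel with
  | zero => simp [pvWhile, h0]
  | succ f => simp [pvWhile, h0, h1]

theorem pvMain (arrays : List (List Int)) (hn : 2 ≤ arrays.length) :
    maxDistance arrays = maxDistance_alt arrays := by
  -- the two programs build the same (value, index) pair lists
  have hBL : (PySem.List.enumerate arrays 0).map (fun pa => (PySem.List.pyGetD pa.2 (-1) 0, pa.1))
      = (PySem.List.pyRange 0 ((arrays.length : Int)) 1).map
          (fun i => (PySem.List.pyGetD (PySem.List.pyGetD arrays i []) (-1) 0, i)) := by
    rw [PySem.List.enumerate_eq_map_pyRange arrays [], List.map_map]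
    simp [PySem.List.len_eq, Function.comp]
  have hBF : (PySem.List.enumerate arrays 0).map (fun pa => (PySem.List.pyGetD pa.2 0 0, pa.1))
      = (PySem.List.pyRange 0 ((arrays.length : Int)) 1).map
          (fun i => (PySem.List.pyGetD (PySem.List.pyGetD arrays i []) 0 0, i)) := by
    rw [PySem.List.enumerate_eq_map_pyRange arrays [], List.map_map]
    simp [PySem.List.len_eq, Function.comp]
  set L := (PySem.List.pyRange 0 ((arrays.length : Int)) 1).map
      (fun i => (PySem.List.pyGetD (PySem.List.pyGetD arrays i []) (-1) 0, i)) with hLdef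
  set F := (PySem.List.pyRange 0 ((arrays.length : Int)) 1).map
      (fun i => (PySem.List.pyGetD (PySem.List.pyGetD arrays i []) 0 0, i)) with hFdef
  have hLsnd : (L.map Prod.snd).Nodup := by
    rw [hLdef, List.map_map]
    rw [show (Prod.snd ∘ fun i : Int => (PySem.List.pyGetD (PySem.List.pyGetD arrays i []) (-1) 0, i)) = id from rfl, List.map_id]
    exact PySem.List.nodup_pyRange_one 0 (arrays.length : Int)
  have hFsnd : (F.map Prod.snd).Nodup := by
    rw [hFdef, List.map_map]
    rw [show (Prod.snd ∘ fun i : Int => (PySem.List.pyGetD (PySem.List.pyGetD arrays i []) 0 0, i)) = id from rfl, List.map_id]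
    exact PySem.List.nodup_pyRange_one 0 (arrays.length : Int)
  have hLlen : L.length = arrays.length := by
    rw [hLdef, List.length_map, PySem.List.length_pyRange_one]; omega
  have hFlen : F.length = arrays.length := by
    rw [hFdef, List.length_map, PySem.List.length_pyRange_one]; omega
  obtain ⟨a, b, r, hs⟩ : ∃ a b r, PySem.List.sorted L pvKey true = a :: b :: r := by
    have h2 : 2 ≤ (PySem.List.sorted L pvKey true).length := by
      rw [PySem.List.length_sorted, hLlen]; omega
    match h : PySem.List.sorted L pvKey true with
    | [] => rw [h] at h2; simp at h2
    | [x] => rw [h] at h2; simp at h2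
    | x :: y :: t => exact ⟨x, y, t, rfl⟩
  obtain ⟨c, d, r', ht⟩ : ∃ c d r', PySem.List.sorted F pvKey false = c :: d :: r' := by
    have h2 : 2 ≤ (PySem.List.sorted F pvKey false).length := by
      rw [PySem.List.length_sorted, hFlen]; omega
    match h : PySem.List.sorted F pvKey false with
    | [] => rw [h] at h2; simp at h2
    | [x] => rw [h] at h2; simp at h2
    | x :: y :: t => exact ⟨x, y, t, rfl⟩
  -- distinct indices inside the sorted lists
  have hsperm : (a :: b :: r).Perm L := hs ▸ PySem.List.sorted_perm L pvKey true
  have htperm : (c :: d :: r').Perm F := ht ▸ PySem.List.sorted_perm F pvKey false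
  have hba : b.2 ≠ a.2 := by
    intro h
    have hb : b ∈ L := hsperm.subset (by simp)
    have ha : a ∈ L := hsperm.subset (by simp)
    have : b = a := List.inj_on_of_nodup_map hLsnd hb ha h
    have hnds : (a :: b :: r).Nodup := (hsperm.nodup_iff).mpr (List.Nodup.of_map _ hLsnd)
    rw [this] at hnds; simp at hnds
  have hdc : d.2 ≠ c.2 := by
    intro h
    have hd : d ∈ F := htperm.subset (by simp)
    have hc : c ∈ F := htperm.subset (by simp)
    have : d = c := List.inj_on_of_nodup_map hFsnd hd hc h
    have hnds : (c :: d :: r').Nodup := (htperm.nodup_iff).mpr (List.Nodup.of_map _ hFsnd)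
    rw [this] at hnds; simp at hnds
  have e1 : PySem.List.pyGetD (a :: b :: r) ((1 : Nat) : Int) (0, 0) = b := by
    rw [PySem.List.pyGetD_natCast]; rfl
  have e2 : PySem.List.pyGetD (c :: d :: r') ((1 : Nat) : Int) (0, 0) = d := by
    rw [PySem.List.pyGetD_natCast]; rfl
  simp only [Nat.cast_one] at e1 e2
  -- evaluate both programs
  rw [maxDistance, maxDistance_alt]
  simp only [hBL, hBF, ← hLdef, ← hFdef, sorted2_eq_sorted_lex, hs, ht,
    max2?_eq_max?_lex, min2?_eq_min?_lex,
    max?_of_sorted_rev L a (b :: r) hs, min?_of_sorted F c (d :: r') ht, Option.getD_some]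
  by_cases hac : a.2 = c.2
  · -- heads share the index: both take the "second best" pair
    have hi1 : pvWhile (fun i => decide (i < arrays.length) &&
        ((PySem.List.pyGetD (a :: b :: r) (i : Int) (0, 0)).2 ==
          (PySem.List.pyGetD (c :: d :: r') 0 (0, 0)).2)) (arrays.length + 1) 0 = 1 := by
      have hbc : b.2 ≠ c.2 := by rw [← hac]; exact hba
      apply pvWhile_one
      · simp [PySem.List.pyGetD_zero_cons, hac]; omega
      · simp [PySem.List.pyGetD_zero_cons, e1, hbc]
    have hj1 : pvWhile (fun j => decide (j < arrays.length) &&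
        ((PySem.List.pyGetD (a :: b :: r) 0 (0, 0)).2 ==
          (PySem.List.pyGetD (c :: d :: r') (j : Int) (0, 0)).2)) (arrays.length + 1) 0 = 1 := by
      have had : a.2 ≠ d.2 := by rw [hac]; exact fun h => hdc h.symm
      apply pvWhile_one
      · simp [PySem.List.pyGetD_zero_cons, hac]; omega
      · simp [PySem.List.pyGetD_zero_cons, e2, had]
    rw [hi1, hj1]
    rw [max?_filter_of_sorted_rev L a b r hLsnd hs, min?_filter_of_sorted F c d r' hFsnd ht]
    simp [PySem.List.pyGetD_zero_cons, e1, e2, hac]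
  · -- heads have different indices: both return |max last − min first|
    have hi1 : pvWhile (fun i => decide (i < arrays.length) &&
        ((PySem.List.pyGetD (a :: b :: r) (i : Int) (0, 0)).2 ==
          (PySem.List.pyGetD (c :: d :: r') 0 (0, 0)).2)) (arrays.length + 1) 0 = 0 := by
      apply pvWhile_zero
      simp [PySem.List.pyGetD_zero_cons, hac]
    have hj1 : pvWhile (fun j => decide (j < arrays.length) &&
        ((PySem.List.pyGetD (a :: b :: r) 0 (0, 0)).2 ==
          (PySem.List.pyGetD (c :: d :: r') (j : Int) (0, 0)).2)) (arrays.length + 1) 0 = 0 := by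
      apply pvWhile_zero
      simp [PySem.List.pyGetD_zero_cons, hac]
    rw [hi1, hj1]
    simp [PySem.List.pyGetD_zero_cons, hac]

-- ===== VERDICT (by name: the statement is the Claim_ definition above) =====
theorem maxDistance_spec : Claim_equal_maxDistance := by
  intro arrays _ hpre
  unfold Spec_maxDistance
  exact pvMain arrays hpre.1
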